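-- pv_equiv track=rewrite | github.com/Isaiahpromax-hub/voice-recognition-system | mffc.py | get_dac_frame_positions
-- ===== SOURCE A (Python) =====
-- FRAME_SIZE = 256
--
-- def get_dac_frame_positions(audio, start, end, frame_size=FRAME_SIZE, positions=None):
--     """ Pure Divide-and-Conquer to collect frame starting positions """
--     if positions is None:
--         positions = []
--
--     if end - start < frame_size:
--         return positions
--
--     positions.append(start)
--
--     mid = (start + end) // 2
--     get_dac_frame_positions(audio, start, mid, frame_size, positions)
--     get_dac_frame_positions(audio, mid, end, frame_size, positions)
--
--     return sorted(set(positions))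
-- ===== SOURCE B (Python) =====
-- FRAME_SIZE = 256
--
-- def get_dac_frame_positions(audio, start, end, frame_size=FRAME_SIZE, positions=None):
--     """Collect frame starting positions with an explicit stack instead of recursion.
--     Return-value (and mutation) equivalent to the recursive version."""
--     if positions is None:
--         positions = []
--     if end - start < frame_size:
--         return positions
--     stack = [(start, end)]
--     while stack:
--         s, e = stack.pop()
--         if e - s < frame_size:
--             continue
--         positions.append(s)
--         mid = (s + e) // 2
--         stack.append((mid, e))
--         stack.append((s, mid))
--     return sorted(set(positions))
-- ===== Notes on version B (the rewrite author's own statement) =====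
-- stated objective: alternative
-- what changed: Replaced the recursive divide-and-conquer (which mutates a shared list through recursive calls) by an explicit-stack while loop that pops intervals, records starts in the same preorder, and pushes the two halves.
import Mathlib
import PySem

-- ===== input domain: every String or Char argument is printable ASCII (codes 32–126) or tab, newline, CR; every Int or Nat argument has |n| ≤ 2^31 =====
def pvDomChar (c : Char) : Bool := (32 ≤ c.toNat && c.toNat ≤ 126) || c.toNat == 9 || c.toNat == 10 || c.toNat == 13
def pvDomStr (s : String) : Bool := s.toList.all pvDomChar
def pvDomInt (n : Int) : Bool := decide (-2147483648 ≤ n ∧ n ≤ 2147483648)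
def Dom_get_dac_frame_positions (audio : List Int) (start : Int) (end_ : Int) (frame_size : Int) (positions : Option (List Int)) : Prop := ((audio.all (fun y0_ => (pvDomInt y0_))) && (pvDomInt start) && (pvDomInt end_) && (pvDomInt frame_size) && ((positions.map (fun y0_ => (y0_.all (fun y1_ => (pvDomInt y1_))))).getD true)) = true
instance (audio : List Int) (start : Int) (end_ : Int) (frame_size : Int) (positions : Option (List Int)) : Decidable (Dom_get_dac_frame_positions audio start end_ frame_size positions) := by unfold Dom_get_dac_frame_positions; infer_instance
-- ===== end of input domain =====

-- B replaces A's recursive bisection by an explicit-stack loop (alternative decomposition, same cost);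
-- the equivalence proved is about the RETURN value (B performs the same in-place mutation of `positions` in Python).

-- ===== PORT A =====
-- A's recursion, mutation-threaded: returns the mutated `positions` list. Fuel only guards
-- totality; (e-s).toNat fuel suffices whenever frame_size ≥ 2 (interval lengths shrink).
def goA (fuel : Nat) (s e fs : Int) (ps : List Int) : List Int :=
  match fuel with
  | 0 => ps
  | fuel + 1 =>
    if e - s < fs then ps
    else
      let ps := ps ++ [s]
      let mid := PySem.Int.floordiv (s + e) 2
      let ps := goA fuel s mid fs ps
      goA fuel mid e fs ps

def get_dac_frame_positions (audio : List Int) (start : Int) (end_ : Int) (frame_size : Int) (positions : Option (List Int)) : List Int :=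
  let ps := positions.getD []
  if end_ - start < frame_size then ps
  else
    let ps := ps ++ [start]
    let mid := PySem.Int.floordiv (start + end_) 2
    let ps := goA (end_ - start).toNat start mid frame_size ps
    let ps := goA (end_ - start).toNat mid end_ frame_size ps
    PySem.List.sorted (PySem.Set.ofList ps) (fun x => x) false

-- ===== PORT B =====
-- B's while loop over an explicit stack (top of stack = head). Fuel only guards totality;
-- (3*(e-s)).toNat iterations suffice whenever frame_size ≥ 2.
def goB (fuel : Nat) (fs : Int) (stack : List (Int × Int)) (ps : List Int) : List Int :=
  match fuel, stack with
  | _, [] => ps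
  | 0, _ :: _ => ps
  | fuel + 1, (s, e) :: rest =>
    if e - s < fs then goB fuel fs rest ps
    else
      let mid := PySem.Int.floordiv (s + e) 2
      goB fuel fs ((s, mid) :: (mid, e) :: rest) (ps ++ [s])

def get_dac_frame_positions_alt (audio : List Int) (start : Int) (end_ : Int) (frame_size : Int) (positions : Option (List Int)) : List Int :=
  let ps := positions.getD []
  if end_ - start < frame_size then ps
  else
    let ps := goB (3 * (end_ - start)).toNat frame_size [(start, end_)] ps
    PySem.List.sorted (PySem.Set.ofList ps) (fun x => x) false

-- ===== PRECONDITION & SPEC =====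
-- Pre_ excludes exactly the inputs on which Python A never returns (RecursionError / divergence):
-- if end-start ≥ frame_size and frame_size ≤ 1 the bisection never reaches intervals shorter than
-- frame_size. A returns on every input satisfying Pre_.
def Pre_get_dac_frame_positions (audio : List Int) (start : Int) (end_ : Int) (frame_size : Int) (positions : Option (List Int)) : Prop :=
  end_ - start < frame_size ∨ 2 ≤ frame_size
instance (audio : List Int) (start : Int) (end_ : Int) (frame_size : Int) (positions : Option (List Int)) : Decidable (Pre_get_dac_frame_positions audio start end_ frame_size positions) := by unfold Pre_get_dac_frame_positions; infer_instance

def pvWitness_get_dac_frame_positions : List Int × Int × Int × Int × Option (List Int) := ([], 0, 1000, 256, none)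

def Spec_get_dac_frame_positions (audio : List Int) (start : Int) (end_ : Int) (frame_size : Int) (positions : Option (List Int)) (out : List Int) : Prop := out = get_dac_frame_positions_alt audio start end_ frame_size positions
instance (audio : List Int) (start : Int) (end_ : Int) (frame_size : Int) (positions : Option (List Int)) (out : List Int) : Decidable (Spec_get_dac_frame_positions audio start end_ frame_size positions out) := by unfold Spec_get_dac_frame_positions; infer_instance

-- ===== CLAIM (what is proved, stated in full; the proofs are below) =====
def Claim_equal_get_dac_frame_positions : Prop := ∀ (audio : List Int) (start : Int) (end_ : Int) (frame_size : Int) (positions : Option (List Int)), Dom_get_dac_frame_positions audio start end_ frame_size positions → Pre_get_dac_frame_positions audio start end_ frame_size positions → Spec_get_dac_frame_positions audio start end_ frame_size positions (get_dac_frame_positions audio start end_ frame_size positions)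

-- ===== LEMMAS AND PROOFS =====

theorem goA_base {fuel : Nat} {s e fs : Int} {ps : List Int} (h : e - s < fs) :
    goA fuel s e fs ps = ps := by
  cases fuel <;> simp [goA, h]

-- fuel invariance of goA above the interval length, for frame_size ≥ 2
theorem goA_fuel (f1 : Nat) (f2 : Nat) (s e fs : Int) (ps : List Int)
    (hfs : 2 ≤ fs) (h1 : (e - s).toNat ≤ f1) (h2 : (e - s).toNat ≤ f2) :
    goA f1 s e fs ps = goA f2 s e fs ps := by
  induction f1 generalizing f2 s e ps with
  | zero =>
      have hb : e - s < fs := by omega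
      rw [goA_base hb, goA_base hb]
  | succ f1 ih =>
      cases f2 with
      | zero =>
          have hb : e - s < fs := by omega
          rw [goA_base hb, goA_base hb]
      | succ f2 =>
          by_cases hb : e - s < fs
          · rw [goA_base hb, goA_base hb]
          · have hmid : PySem.Int.floordiv (s + e) 2 = (s + e) / 2 :=
              PySem.Int.floordiv_eq_ediv_of_pos (by omega)
            simp only [goA, if_neg hb, hmid]
            rw [ih f2 s ((s + e) / 2) _ (by omega) (by omega),
                ih f2 ((s + e) / 2) e _ (by omega) (by omega)]

-- one unfolding of goA at exact fuel (e-s).toNat, for frame_size ≥ 2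
theorem goA_step (s e fs : Int) (ps : List Int) (hfs : 2 ≤ fs) (hb : ¬ e - s < fs) :
    goA (e - s).toNat s e fs ps =
      goA (e - PySem.Int.floordiv (s + e) 2).toNat (PySem.Int.floordiv (s + e) 2) e fs
        (goA (PySem.Int.floordiv (s + e) 2 - s).toNat s (PySem.Int.floordiv (s + e) 2) fs (ps ++ [s])) := by
  have hmid : PySem.Int.floordiv (s + e) 2 = (s + e) / 2 :=
    PySem.Int.floordiv_eq_ediv_of_pos (by omega)
  have hn : (e - s).toNat = ((e - s).toNat - 1) + 1 := by omega
  conv_lhs => rw [hn, goA]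
  simp only [if_neg hb, hmid]
  rw [goA_fuel ((e - s).toNat - 1) (((s + e) / 2) - s).toNat s ((s + e) / 2) fs _
        hfs (by omega) (by omega),
      goA_fuel ((e - s).toNat - 1) (e - ((s + e) / 2)).toNat ((s + e) / 2) e fs _
        hfs (by omega) (by omega)]

-- per-interval fuel weight for the stack loop
def wB (p : Int × Int) : Nat := (3 * (p.2 - p.1) - 2).toNat + 1

-- the stack loop is the left fold of goA over the stack, given enough fuel
theorem goB_eq_fold (fuel : Nat) (fs : Int) (stack : List (Int × Int)) (ps : List Int)
    (hfs : 2 ≤ fs) (hfuel : (stack.map wB).sum ≤ fuel) :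
    goB fuel fs stack ps =
      stack.foldl (fun acc p => goA (p.2 - p.1).toNat p.1 p.2 fs acc) ps := by
  induction fuel generalizing stack ps with
  | zero =>
      cases stack with
      | nil => simp [goB]
      | cons p rest => simp [wB] at hfuel
  | succ fuel ih =>
      cases stack with
      | nil => simp [goB]
      | cons p rest =>
          obtain ⟨s, e⟩ := p
          have hsum : wB (s, e) + (rest.map wB).sum ≤ fuel + 1 := by
            simpa using hfuel
          have hw1 : 1 ≤ wB (s, e) := Nat.le_add_left 1 _
          by_cases hb : e - s < fs
          · simp only [goB, if_pos hb, List.foldl_cons]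
            rw [goA_base hb]
            exact ih rest ps (by omega)
          · have hmid : PySem.Int.floordiv (s + e) 2 = (s + e) / 2 :=
              PySem.Int.floordiv_eq_ediv_of_pos (by omega)
            simp only [goB, if_neg hb]
            rw [ih ((s, PySem.Int.floordiv (s + e) 2) ::
                    (PySem.Int.floordiv (s + e) 2, e) :: rest) (ps ++ [s])
                  (by simp only [List.map_cons, List.sum_cons, wB, hmid] at hsum ⊢; omega)]
            simp only [List.foldl_cons]
            rw [← goA_step s e fs ps hfs hb]

-- ===== VERDICT (by name: the statement is the Claim_ definition above) =====
theorem get_dac_frame_positions_spec : Claim_equal_get_dac_frame_positions := by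
  intro audio start end_ fs positions _ hpre
  unfold Spec_get_dac_frame_positions get_dac_frame_positions get_dac_frame_positions_alt
  by_cases hb : end_ - start < fs
  · simp [hb]
  · have hfs : 2 ≤ fs := by
      rcases hpre with h | h
      · exact absurd h hb
      · exact h
    have hmid : PySem.Int.floordiv (start + end_) 2 = (start + end_) / 2 :=
      PySem.Int.floordiv_eq_ediv_of_pos (by omega)
    simp only [if_neg hb]
    rw [goB_eq_fold _ fs [(start, end_)] (positions.getD []) hfs
          (by simp only [List.map_cons, List.map_nil, List.sum_cons, List.sum_nil, wB]; omega)]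
    simp only [List.foldl_cons, List.foldl_nil]
    rw [goA_step start end_ fs (positions.getD []) hfs hb]
    rw [goA_fuel (PySem.Int.floordiv (start + end_) 2 - start).toNat (end_ - start).toNat
          start (PySem.Int.floordiv (start + end_) 2) fs _ hfs (by omega) (by rw [hmid]; omega),
        goA_fuel (end_ - PySem.Int.floordiv (start + end_) 2).toNat (end_ - start).toNat
          (PySem.Int.floordiv (start + end_) 2) end_ fs _ hfs (by omega) (by rw [hmid]; omega)]
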